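-- pv_equiv track=rewrite | github.com/sutormin94/Rogaine_route_planner | Route_planner.py | refine_output_routes
-- ===== SOURCE A (Python) =====
-- def refine_output_routes(routes_list, routes_to_keep):
--     list_for_sorting=[]
--     list_of_routes_refined=[]
--     for i in range(len(routes_list)):
--         list_for_sorting.append([i, routes_list[i][-1][2], routes_list[i][-1][1]])
--     list_for_sorting.sort(key=lambda tup: tup[1], reverse=True)
--     if len(list_for_sorting)!=0:
--         the_highest_score=list_for_sorting[0][1]
--         top_scores_list=[]
--         for i in list_for_sorting:
--             if i[1]==the_highest_score:
--                 top_scores_list.append(i)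
--             else:
--                 break
--         top_scores_list.sort(key=lambda tup: tup[2], reverse=False)
--         for i in top_scores_list[:routes_to_keep]:
--             list_of_routes_refined.append(routes_list[i[0]])
--     return list_of_routes_refined
-- ===== SOURCE B (Python) =====
-- def refine_output_routes(routes_list, routes_to_keep):
--     if not routes_list:
--         return []
--     best = max(r[-1][2] for r in routes_list)
--     ties = [(i, r[-1][1]) for i, r in enumerate(routes_list) if r[-1][2] == best]
--     ties.sort(key=lambda t: t[1])
--     return [routes_list[i] for i, _ in ties[:routes_to_keep]]
-- ===== Notes on version B (the rewrite author's own statement) =====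
-- stated objective: alternative
-- what changed: Instead of building and fully sorting an index list of all routes and then taking the equal-score prefix, B finds the maximum score in one linear pass, collects only the tied routes, and sorts just that small subset by the secondary key.
import Mathlib
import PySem

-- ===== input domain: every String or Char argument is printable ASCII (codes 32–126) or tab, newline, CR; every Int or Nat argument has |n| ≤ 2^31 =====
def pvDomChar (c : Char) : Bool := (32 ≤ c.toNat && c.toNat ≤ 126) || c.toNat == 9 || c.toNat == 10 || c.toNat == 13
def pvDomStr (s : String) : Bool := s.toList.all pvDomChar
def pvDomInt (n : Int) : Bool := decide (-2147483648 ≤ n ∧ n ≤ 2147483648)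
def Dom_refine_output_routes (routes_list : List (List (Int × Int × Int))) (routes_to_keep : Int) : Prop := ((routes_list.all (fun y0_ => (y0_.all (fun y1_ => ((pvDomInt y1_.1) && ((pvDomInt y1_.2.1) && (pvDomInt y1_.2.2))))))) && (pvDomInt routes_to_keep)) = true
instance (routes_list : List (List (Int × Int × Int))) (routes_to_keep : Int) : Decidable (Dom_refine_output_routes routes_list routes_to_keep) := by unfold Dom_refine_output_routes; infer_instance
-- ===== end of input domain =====

-- B replaces A's full sort of all routes by one linear max-pass plus a sort of only the
-- tied top-score routes (equality of RETURN values; A mutates only its local lists).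

-- ===== PORT A =====
-- Literal port of A: build [i, last[2], last[1]] for every index, sort it all by score
-- descending, take the equal-score prefix (the for-loop with break = takeWhile), sort that
-- prefix by the secondary key ascending, slice to routes_to_keep, and look the routes back up.
def refine_output_routes (routes_list : List (List (Int × Int × Int))) (routes_to_keep : Int) : List (List (Int × Int × Int)) :=
  let list_for_sorting :=
    (PySem.List.pyRange 0 (PySem.List.len routes_list)).foldl
      (fun acc i =>
        let r := PySem.List.pyGetD routes_list i []
        let last := (PySem.List.pyGet? r (-1)).getD (0, 0, 0)  -- r[-1]: IndexError on an empty route, excluded by Pre_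
        acc ++ [(i, last.2.2, last.2.1)]) []
  let lfs := PySem.List.sorted list_for_sorting (fun t => t.2.1) true
  match lfs with
  | [] => []
  | m :: _ =>
    let the_highest_score := m.2.1
    let top_scores_list := lfs.takeWhile (fun t => t.2.1 == the_highest_score)
    let top_sorted := PySem.List.sorted top_scores_list (fun t => t.2.2) false
    (PySem.List.slice top_sorted none (some routes_to_keep)).foldl
      (fun acc t => acc ++ [PySem.List.pyGetD routes_list t.1 []]) []

-- ===== PORT B =====
-- Literal port of B (Source B): linear max pass, collect the tied (index, secondary) pairs,
-- sort only those, slice, look up.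
def refine_output_routes_alt (routes_list : List (List (Int × Int × Int))) (routes_to_keep : Int) : List (List (Int × Int × Int)) :=
  match routes_list with
  | [] => []
  | r0 :: rest =>
    let lastOf := fun (r : List (Int × Int × Int)) => (PySem.List.pyGet? r (-1)).getD (0, 0, 0)
    let best := rest.foldl (fun acc r => max acc (lastOf r).2.2) (lastOf r0).2.2
    let ties := ((PySem.List.enumerate routes_list).filter (fun p => (lastOf p.2).2.2 == best)).map
        (fun p => (p.1, (lastOf p.2).2.1))
    let ties2 := PySem.List.sorted ties (fun t => t.2) false
    (PySem.List.slice ties2 none (some routes_to_keep)).map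
      (fun t => PySem.List.pyGetD routes_list t.1 [])

-- ===== PRECONDITION & SPEC =====
-- Pre_ excludes exactly the inputs containing an empty route, on which A (and B) raise
-- IndexError at routes_list[i][-1].
def Pre_refine_output_routes (routes_list : List (List (Int × Int × Int))) (routes_to_keep : Int) : Prop :=
  ∀ r ∈ routes_list, r ≠ []
instance (routes_list : List (List (Int × Int × Int))) (routes_to_keep : Int) : Decidable (Pre_refine_output_routes routes_list routes_to_keep) := by unfold Pre_refine_output_routes; infer_instance
def pvWitness_refine_output_routes : (List (List (Int × Int × Int))) × Int :=
  ([[(0, 1, 2)], [(3, 4, 5)], [(6, 7, 2)]], 2)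

def Spec_refine_output_routes (routes_list : List (List (Int × Int × Int))) (routes_to_keep : Int) (out : List (List (Int × Int × Int))) : Prop := out = refine_output_routes_alt routes_list routes_to_keep
instance (routes_list : List (List (Int × Int × Int))) (routes_to_keep : Int) (out : List (List (Int × Int × Int))) : Decidable (Spec_refine_output_routes routes_list routes_to_keep out) := by unfold Spec_refine_output_routes; infer_instance

-- ===== CLAIM (what is proved, stated in full; the proofs are below) =====
def Claim_equal_refine_output_routes : Prop := ∀ (routes_list : List (List (Int × Int × Int))) (routes_to_keep : Int), Dom_refine_output_routes routes_list routes_to_keep → Pre_refine_output_routes routes_list routes_to_keep → Spec_refine_output_routes routes_list routes_to_keep (refine_output_routes routes_list routes_to_keep)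

-- ===== LEMMAS AND PROOFS =====

-- folding `acc ++ [g x]` is mapping
theorem pv_foldl_append_map {α β : Type} (g : α → β) (l : List α) :
    l.foldl (fun acc x => acc ++ [g x]) [] = l.map g := by
  rw [PySem.List.foldl_append_eq_flatMap (fun x => [g x]) l []]
  induction l with
  | nil => rfl
  | cons x xs ih => simpa using ih

-- a running max of a projection is attained (or is the initial value)
theorem pv_foldl_max_attained {β : Type} (f : β → Int) (xs : List β) (init : Int) :
    xs.foldl (fun acc y => max acc (f y)) init = init ∨
      ∃ x ∈ xs, xs.foldl (fun acc y => max acc (f y)) init = f x := by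
  induction xs generalizing init with
  | nil => exact Or.inl rfl
  | cons y ys ih =>
    rcases ih (max init (f y)) with h | ⟨x, hx, h⟩
    · rcases max_choice init (f y) with hm | hm
      · exact Or.inl (by simpa [hm] using h)
      · exact Or.inr ⟨y, by simp, by simpa [hm] using h⟩
    · exact Or.inr ⟨x, by simp [hx], h⟩

-- stability of insertion (reverse sort): inserting x into acc, with every key ≤ c,
-- extends the maximal-key (= c) prefix exactly when key x = c.
theorem pv_tw_insertBy {α : Type} (key : α → Int) (c : Int) (x : α) (acc : List α)
    (hx : key x ≤ c) (hacc : ∀ y ∈ acc, key y ≤ c) :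
    (PySem.List.insertBy (fun a b => decide (key b < key a)) x acc).takeWhile
        (fun e => key e == c)
      = acc.takeWhile (fun e => key e == c) ++ (if key x = c then [x] else []) := by
  induction acc with
  | nil =>
    by_cases h : key x = c <;> simp [PySem.List.insertBy, List.takeWhile, h]
  | cons y ys ih =>
    have hy : key y ≤ c := hacc y (by simp)
    simp only [PySem.List.insertBy]
    by_cases hlt : key y < key x
    · have hyc : ¬ key y = c := by omega
      by_cases hxc : key x = c
      · simp [hxc, beq_iff_eq, hyc, (show key y < c by omega)]
      · simp [hlt, hxc, beq_iff_eq, hyc]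
    · have hxy : key x ≤ key y := by omega
      by_cases hyc : key y = c
      · simp [hyc, (show ¬ c < key x by omega), ih (fun z hz => hacc z (by simp [hz]))]
      · have hxc : ¬ key x = c := by omega
        simp [hlt, beq_iff_eq, hyc, hxc]

-- the maximal-key prefix of a stable reverse sort is the filter of the original list
theorem pv_tw_sorted_rev {α : Type} (key : α → Int) (c : Int) (xs : List α)
    (h : ∀ x ∈ xs, key x ≤ c) :
    (PySem.List.sorted xs key true).takeWhile (fun e => key e == c)
      = xs.filter (fun e => key e == c) := by
  induction xs using List.reverseRecOn with
  | nil => simp [PySem.List.sorted]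
  | append_singleton ys x ih =>
    rw [PySem.List.sorted_rev_eq_foldl_insertBy, List.foldl_append]
    rw [← PySem.List.sorted_rev_eq_foldl_insertBy]
    simp only [List.foldl_cons, List.foldl_nil]
    rw [pv_tw_insertBy key c x _ (h x (by simp))
        (fun y hy => h y (by simp [(PySem.List.mem_sorted ys key true y).1 hy]))]
    rw [ih (fun y hy => h y (by simp [hy]))]
    by_cases hxc : key x = c <;> simp [List.filter_append, hxc]

-- insertion commutes with a key-preserving map
theorem pv_insertBy_map {α β : Type} (g : α → β) (p : α → α → Bool) (q : β → β → Bool)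
    (hpq : ∀ a b, q (g a) (g b) = p a b) (x : α) (ys : List α) :
    PySem.List.insertBy q (g x) (ys.map g) = (PySem.List.insertBy p x ys).map g := by
  induction ys with
  | nil => simp [PySem.List.insertBy]
  | cons y ys ih =>
    simp only [List.map_cons, PySem.List.insertBy, hpq]
    by_cases h : p x y <;> simp [h, ih]

-- a stable sort commutes with a key-preserving map
theorem pv_sorted_map {α β : Type} (g : α → β) (keyA : α → Int) (keyB : β → Int)
    (hk : ∀ a, keyB (g a) = keyA a) (xs : List α) :
    PySem.List.sorted (xs.map g) keyB false = (PySem.List.sorted xs keyA false).map g := by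
  rw [PySem.List.sorted_eq_foldl_insertBy, PySem.List.sorted_eq_foldl_insertBy,
    List.foldl_map]
  suffices hgen : ∀ acc : List α,
      xs.foldl (fun acc x => PySem.List.insertBy (fun a b => decide (keyB a < keyB b)) (g x) acc)
        (acc.map g)
      = (xs.foldl (fun acc x => PySem.List.insertBy (fun a b => decide (keyA a < keyA b)) x acc)
          acc).map g by
    simpa using hgen []
  intro acc
  induction xs generalizing acc with
  | nil => rfl
  | cons x xs ih =>
    simp only [List.foldl_cons]
    rw [pv_insertBy_map g (fun a b => decide (keyA a < keyA b)) (fun a b => decide (keyB a < keyB b)) (fun a b => by simp [hk]) x acc, ih]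

-- slicing a prefix commutes with map
theorem pv_slice_map {α β : Type} (g : α → β) (xs : List α) (k : Int) :
    PySem.List.slice (xs.map g) none (some k) = (PySem.List.slice xs none (some k)).map g := by
  simp [PySem.List.slice, PySem.List.clampIdx]

theorem refine_output_routes_spec_aux (routes_list : List (List (Int × Int × Int)))
    (routes_to_keep : Int) (hpre : Pre_refine_output_routes routes_list routes_to_keep) :
    refine_output_routes routes_list routes_to_keep
      = refine_output_routes_alt routes_list routes_to_keep := by
  classical
  cases routes_list with
  | nil => rfl
  | cons r0 rest =>
  simp only [refine_output_routes, refine_output_routes_alt]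
  set lastOf := fun (r : List (Int × Int × Int)) => (PySem.List.pyGet? r (-1)).getD (0, 0, 0)
    with hlastOf
  set f := fun (p : Int × List (Int × Int × Int)) =>
    (p.1, (lastOf p.2).2.2, (lastOf p.2).2.1) with hf
  set g := fun (t : Int × Int × Int) => (t.1, t.2.2) with hg
  -- Step 1: A's list_for_sorting is the enumerate map
  have h1 : (PySem.List.pyRange 0 (PySem.List.len (r0 :: rest))).foldl
      (fun acc i =>
        acc ++ [(i, ((PySem.List.pyGet? (PySem.List.pyGetD (r0 :: rest) i []) (-1)).getD (0,0,0)).2.2,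
                    ((PySem.List.pyGet? (PySem.List.pyGetD (r0 :: rest) i []) (-1)).getD (0,0,0)).2.1)]) []
      = (PySem.List.enumerate (r0 :: rest)).map f := by
    rw [pv_foldl_append_map, PySem.List.enumerate_eq_map_pyRange (r0 :: rest) [], List.map_map]
    rfl
  rw [h1]
  set E := (PySem.List.enumerate (r0 :: rest)).map f with hE
  have hEne : E ≠ [] := by
    simp [hE, PySem.List.enumerate_cons]
  cases hs : PySem.List.sorted E (fun t => t.2.1) true with
  | nil => exact absurd ((PySem.List.sorted_eq_nil_iff E _ true).1 hs) hEne
  | cons m t =>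
  -- Step 2: the head key of the reverse sort equals B's running max
  have hge := PySem.List.key_head_sorted_rev_ge E (fun t => t.2.1) hs
  set best := rest.foldl (fun acc r => max acc (lastOf r).2.2) ((lastOf r0).2.2) with hbest
  have hbestub : ∀ r ∈ (r0 :: rest), (lastOf r).2.2 ≤ best := by
    intro r hr
    have hb := PySem.List.le_foldl_max_int rest (fun r => (lastOf r).2.2) ((lastOf r0).2.2)
    rcases (by simpa using hr : r = r0 ∨ r ∈ rest) with h | h
    · simpa [h, hbest] using hb.1
    · simpa [hbest] using hb.2 r h
  have hentry_of_route : ∀ r ∈ (r0 :: rest), ∃ e ∈ E, e.2.1 = (lastOf r).2.2 := by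
    intro r hr
    have : r ∈ (PySem.List.enumerate (r0 :: rest)).map (·.2) := by
      simpa [PySem.List.map_snd_enumerate] using hr
    rcases List.mem_map.1 this with ⟨p, hp, hpr⟩
    exact ⟨f p, List.mem_map_of_mem hp, by simp [hf, hpr]⟩
  have hmE : m ∈ E := (PySem.List.mem_sorted E (fun t => t.2.1) true m).1 (by rw [hs]; simp)
  have hhi_eq : m.2.1 = best := by
    apply le_antisymm
    · rcases List.mem_map.1 hmE with ⟨p, hp, hpm⟩
      have hp2 : p.2 ∈ (r0 :: rest) := by
        have : p.2 ∈ (PySem.List.enumerate (r0 :: rest)).map (·.2) := List.mem_map_of_mem hp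
        simpa [PySem.List.map_snd_enumerate] using this
      have := hbestub p.2 hp2
      simpa [← hpm, hf] using this
    · have hatt : ∃ r ∈ (r0 :: rest), best = (lastOf r).2.2 := by
        rcases pv_foldl_max_attained (fun r => (lastOf r).2.2) rest ((lastOf r0).2.2)
          with h | ⟨x, hx, h⟩
        · exact ⟨r0, by simp, h⟩
        · exact ⟨x, by simp [hx], h⟩
      rcases hatt with ⟨r, hr, hbr⟩
      rcases hentry_of_route r hr with ⟨e, he, hek⟩
      have := hge e he
      simpa [hek, ← hbr] using this
  -- Step 3: the equal-score prefix is the filter of the unsorted entry list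
  have h3 : (m :: t).takeWhile (fun e => e.2.1 == m.2.1)
      = E.filter (fun e => e.2.1 == m.2.1) := by
    rw [← hs]
    exact pv_tw_sorted_rev (fun e => e.2.1) m.2.1 E (fun x hx => hge x hx)
  -- Step 4: that filter is B's filtered enumerate, mapped through f
  have h4 : E.filter (fun e => e.2.1 == m.2.1)
      = ((PySem.List.enumerate (r0 :: rest)).filter (fun p => (lastOf p.2).2.2 == best)).map f := by
    rw [hhi_eq, hE, List.filter_map]
    rfl
  -- Step 5: B's ties are that filtered list mapped through g
  have h5 : ((PySem.List.enumerate (r0 :: rest)).filter (fun p => (lastOf p.2).2.2 == best)).map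
        (fun p => (p.1, (lastOf p.2).2.1))
      = (((PySem.List.enumerate (r0 :: rest)).filter (fun p => (lastOf p.2).2.2 == best)).map f).map g := by
    rw [List.map_map]; rfl
  -- Step 6: the secondary sort and the slice commute with g
  have h6 : ∀ xs : List (Int × Int × Int),
      PySem.List.sorted (xs.map g) (fun t => t.2) false
        = (PySem.List.sorted xs (fun t => t.2.2) false).map g :=
    fun xs => pv_sorted_map g (fun t => t.2.2) (fun t => t.2) (fun a => rfl) xs
  dsimp only
  rw [h3, h4, h5, h6, pv_slice_map, pv_foldl_append_map, List.map_map]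
  rfl

-- ===== VERDICT (by name: the statement is the Claim_ definition above) =====
theorem refine_output_routes_spec : Claim_equal_refine_output_routes := by
  intro rl k _ hpre
  exact refine_output_routes_spec_aux rl k hpre
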